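-- pv_equiv track=rewrite | github.com/Sanielia/DiamentBitMatura | ciagi_zadanie/7.py | longest_coherent_non_coprime_sequence
-- ===== SOURCE A (Python) =====
-- from math import gcd
--
-- def longest_coherent_non_coprime_sequence(sequence: list[int]) -> list[int]:
--     start = 0
--     end = 0
--     current_start = 0
--     length = len(sequence)
--     last_gcd = sequence[0]
--     if length < 2:
--         return sequence
--
--     for i, number in enumerate(sequence):
--         current_gcd = gcd(last_gcd, number)
--         if current_gcd > 1:
--             last_gcd = current_gcd
--             continue
--         last_gcd = number
--         if end - start >= i - current_start:
--             current_start = i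
--             continue
--         start = current_start
--         end = i
--         current_start = i
--
--     if end - start < length - current_start:
--         start = current_start
--         end = length
--
--     return sequence[start:end]
-- ===== SOURCE B (Python) =====
-- from math import gcd
--
--
-- def longest_coherent_non_coprime_sequence(sequence: list[int]) -> list[int]:
--     # Peel the sequence into its maximal coherent runs (as actual sublists),
--     # then pick the first longest run with max(key=len).
--     runs = []
--     rest = sequence
--     while rest:
--         run = [rest[0]]
--         g = rest[0]
--         for x in rest[1:]:
--             h = gcd(g, x)
--             if h <= 1:
--                 break
--             g = h
--             run.append(x)
--         runs.append(run)
--         rest = rest[len(run):]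
--     return max(runs, key=len, default=[])
-- ===== Notes on version B (the rewrite author's own statement) =====
-- stated objective: alternative
-- what changed: Replaces A's single indexed scan with inline four-variable best-interval bookkeeping (start/end/current_start plus an asymmetric end-of-loop fixup and index slicing) by a run-peeling decomposition: an outer while loop repeatedly takes the maximal coherent run off the front of the remaining list as an actual sublist, then the standard-library max(runs, key=len, default) picks the first longest run; no indices, no enumerate, no inline best tracking.
import Mathlib
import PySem

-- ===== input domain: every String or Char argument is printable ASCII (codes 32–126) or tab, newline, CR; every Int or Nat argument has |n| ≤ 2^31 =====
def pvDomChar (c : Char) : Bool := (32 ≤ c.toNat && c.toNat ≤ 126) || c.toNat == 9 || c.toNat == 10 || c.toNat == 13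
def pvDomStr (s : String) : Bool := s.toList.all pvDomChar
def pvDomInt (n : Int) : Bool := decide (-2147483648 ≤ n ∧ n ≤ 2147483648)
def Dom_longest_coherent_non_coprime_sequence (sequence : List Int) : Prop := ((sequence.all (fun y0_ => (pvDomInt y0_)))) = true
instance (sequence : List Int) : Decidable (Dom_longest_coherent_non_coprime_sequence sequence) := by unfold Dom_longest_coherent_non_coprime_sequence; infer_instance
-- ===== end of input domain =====

-- B replaces A's single indexed scan with inline best-interval bookkeeping by a
-- run-peeling decomposition (peel maximal coherent runs off the front as sublists,
-- then max(runs, key=len)); objective: alternative.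

-- ===== PORT A =====
-- loop body of A, one enumerate step over state (start, end, current_start, last_gcd)
def pvStepA (s : Int × Int × Int × Int) (p : Int × Int) : Int × Int × Int × Int :=
  let current_gcd : Int := Int.gcd s.2.2.2 p.2
  if current_gcd > 1 then (s.1, s.2.1, s.2.2.1, current_gcd)
  else if s.2.1 - s.1 ≥ p.1 - s.2.2.1 then (s.1, s.2.1, p.1, p.2)
  else (s.2.2.1, p.1, p.1, p.2)

def longest_coherent_non_coprime_sequence (sequence : List Int) : List Int :=
  match PySem.List.pyGet? sequence 0 with
  | none => []          -- IndexError on empty input: excluded by Pre_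
  | some s0 =>
    let length : Int := sequence.length
    if length < 2 then sequence
    else
      let st := (PySem.List.enumerate sequence 0).foldl pvStepA (0, 0, 0, s0)
      if st.2.1 - st.1 < length - st.2.2.1 then
        PySem.List.slice sequence (some st.2.2.1) (some length)
      else
        PySem.List.slice sequence (some st.1) (some st.2.1)

-- ===== PORT B =====
-- B's inner 'for x in rest[1:]' with break: the elements that extend the current run
def pvTakeRun (g : Int) : List Int → List Int
  | [] => []
  | x :: t =>
    let h : Int := Int.gcd g x
    if h ≤ 1 then [] else x :: pvTakeRun h t

-- B's outer 'while rest:' loop, ported with fuel = length of the remaining list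
-- (each iteration peels a nonempty run, so the fuel never runs out)
def pvPeelGo : Nat → List Int → List (List Int)
  | _, [] => []
  | 0, _ :: _ => []     -- never reached: fuel ≥ length of the list
  | f + 1, x :: xs =>
    let run := x :: pvTakeRun x xs
    run :: pvPeelGo f ((x :: xs).drop run.length)

def longest_coherent_non_coprime_sequence_alt (sequence : List Int) : List Int :=
  PySem.List.maxD (pvPeelGo sequence.length sequence) (fun r => r.length) []

-- ===== PRECONDITION & SPEC =====
-- Pre_ excludes only the empty list, on which A raises IndexError (it reads the first
-- element before its length guard); B would return the empty list there.
def Pre_longest_coherent_non_coprime_sequence (sequence : List Int) : Prop := sequence ≠ []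
instance (sequence : List Int) : Decidable (Pre_longest_coherent_non_coprime_sequence sequence) := by unfold Pre_longest_coherent_non_coprime_sequence; infer_instance

def pvWitness_longest_coherent_non_coprime_sequence : List Int := [6, 3, 5, 10, 4]

def Spec_longest_coherent_non_coprime_sequence (sequence : List Int) (out : List Int) : Prop := out = longest_coherent_non_coprime_sequence_alt sequence
instance (sequence : List Int) (out : List Int) : Decidable (Spec_longest_coherent_non_coprime_sequence sequence out) := by unfold Spec_longest_coherent_non_coprime_sequence; infer_instance

-- ===== CLAIM (what is proved, stated in full; the proofs are below) =====
def Claim_equal_longest_coherent_non_coprime_sequence : Prop := ∀ (sequence : List Int), Dom_longest_coherent_non_coprime_sequence sequence → Pre_longest_coherent_non_coprime_sequence sequence → Spec_longest_coherent_non_coprime_sequence sequence (longest_coherent_non_coprime_sequence sequence)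

-- ===== LEMMAS AND PROOFS =====

-- proof-side only: one step of Python's max(..., key=len) — keep the first longest
def pvBest (b r : List Int) : List Int := if b.length < r.length then r else b

-- pvTakeRun only reads its gcd argument through Int.gcd, so |g| is all that matters
lemma pvTakeRun_congr (t : List Int) : ∀ g g' : Int, g.natAbs = g'.natAbs →
    pvTakeRun g t = pvTakeRun g' t := by
  induction t with
  | nil => intro g g' _; rfl
  | cons x t ih =>
    intro g g' h
    have hg : Int.gcd g x = Int.gcd g' x := by unfold Int.gcd; rw [h]
    simp only [pvTakeRun, hg]

-- the fuel of pvPeelGo is irrelevant as long as it covers the list's length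
lemma pvPeelGo_congr : ∀ (f f' : Nat) (l : List Int), l.length ≤ f → l.length ≤ f' →
    pvPeelGo f l = pvPeelGo f' l := by
  intro f
  induction f with
  | zero =>
    intro f' l h _
    have : l = [] := List.eq_nil_of_length_eq_zero (Nat.le_zero.mp h)
    subst this; cases f' <;> rfl
  | succ f ih =>
    intro f' l h h'
    cases l with
    | nil => cases f' <;> rfl
    | cons x xs =>
      cases f' with
      | zero => exact absurd h' (by simp)
      | succ f' =>
        simp only [pvPeelGo]
        refine congrArg _ (ih f' _ ?_ ?_) <;>
          simp only [List.length_drop, List.length_cons] at * <;> omega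
-- unfold one peeling step at the exact fuel sequence.length
lemma pvPeel_cons (x : Int) (xs : List Int) :
    pvPeelGo (x :: xs).length (x :: xs)
      = (x :: pvTakeRun x xs) ::
        pvPeelGo ((x :: xs).drop (x :: pvTakeRun x xs).length).length
                 ((x :: xs).drop (x :: pvTakeRun x xs).length) := by
  simp only [List.length_cons, pvPeelGo]
  refine congrArg _ (pvPeelGo_congr _ _ _ ?_ le_rfl)
  simp only [List.length_drop, List.length_cons]; omega

-- Python's max(r :: rs, key=len) is the first-longest fold over rs seeded with r
lemma pv_maxD_cons (r : List Int) (rs : List (List Int)) :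
    PySem.List.maxD (r :: rs) (fun t => t.length) [] = rs.foldl pvBest r := by
  have aux : ∀ (F : Option (List Int) → List Int → Option (List Int)),
      (∀ m x, F (some m) x = if m.length < x.length then some x else some m) →
      ∀ (l : List (List Int)) (m : List Int),
      (l.foldl F (some m)).getD [] = l.foldl pvBest m := by
    intro F hF l
    induction l with
    | nil => intro m; rfl
    | cons y l ih =>
      intro m
      rw [List.foldl_cons, hF, List.foldl_cons]
      unfold pvBest
      by_cases h : m.length < y.length
      · rw [if_pos h, if_pos h]; exact ih y
      · rw [if_neg h, if_neg h]; exact ih m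
  unfold PySem.List.maxD PySem.List.max?
  rw [List.foldl_cons]
  exact aux _ (fun m x => rfl) rs r

lemma pv_slice_len (S : List Int) (a b : Int) (h1 : 0 ≤ a) (h2 : a ≤ b)
    (h3 : b ≤ (S.length : Int)) :
    (PySem.List.slice S (some a) (some b)).length = (b - a).toNat := by
  rw [PySem.List.slice_toNat S h1 (le_trans h1 h2)]
  simp only [List.length_take, List.length_drop]
  omega

lemma pv_slice_nil (S : List Int) (a : Int) (h : 0 ≤ a) :
    PySem.List.slice S (some a) (some a) = [] := by
  rw [PySem.List.slice_toNat S h h]; simp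

lemma pv_slice_snoc (S : List Int) (a i y : Int) (t' : List Int) (h0 : 0 ≤ a)
    (ha : a ≤ i) (hd : S.drop i.toNat = y :: t') :
    PySem.List.slice S (some a) (some (i + 1))
      = PySem.List.slice S (some a) (some i) ++ [y] := by
  have hi : 0 ≤ i := le_trans h0 ha
  have hy : S[i.toNat]? = some y := by
    have h := congrArg (fun l => l[0]?) hd
    simp only [List.getElem?_drop] at h
    simpa using h
  rw [PySem.List.slice_toNat S h0 hi, PySem.List.slice_toNat S h0 (by omega)]
  have he : (i + 1).toNat - a.toNat = (i.toNat - a.toNat) + 1 := by omega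
  rw [he, List.take_add_one]
  congr 1
  rw [List.getElem?_drop]
  have : a.toNat + (i.toNat - a.toNat) = i.toNat := by omega
  rw [this, hy]; rfl

-- proof-side only: A's epilogue (the end-of-loop fixup and the final slice)
def pvFinish (S : List Int) (r : Int × Int × Int × Int) : List Int :=
  if r.2.1 - r.1 < (S.length : Int) - r.2.2.1
    then PySem.List.slice S (some r.2.2.1) (some (S.length : Int))
    else PySem.List.slice S (some r.1) (some r.2.1)

-- the loop invariant: A's remaining scan, finalized, equals the first-longest fold
-- over the current run (so far ++ its greedy continuation) and the later peeled runs,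
-- seeded with A's best interval so far
lemma pv_key (S : List Int) : ∀ (t : List Int) (i st en cs g : Int),
    S.drop i.toNat = t → 0 ≤ i → i ≤ (S.length : Int) →
    0 ≤ st → st ≤ en → en ≤ cs → cs ≤ i →
    pvFinish S ((PySem.List.enumerate t i).foldl pvStepA (st, en, cs, g))
    = ((PySem.List.slice S (some cs) (some i) ++ pvTakeRun g t)
        :: pvPeelGo (t.drop (pvTakeRun g t).length).length
                    (t.drop (pvTakeRun g t).length)).foldl pvBest
        (PySem.List.slice S (some st) (some en)) := by
  intro t
  induction t with
  | nil =>
    intro i st en cs g hdrop h0i hiL h0st hsten hencs hcsi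
    have hieq : i = (S.length : Int) := by
      have := congrArg List.length hdrop
      simp only [List.length_drop, List.length_nil] at this
      omega
    simp only [PySem.List.enumerate_nil, List.foldl_nil, pvTakeRun, List.append_nil,
      List.drop_nil, List.length_nil, pvPeelGo, List.foldl_cons, List.foldl_nil,
      pvFinish, pvBest]
    have l1 : (PySem.List.slice S (some st) (some en)).length = (en - st).toNat :=
      pv_slice_len S st en h0st hsten (by omega)
    have l2 : (PySem.List.slice S (some cs) (some i)).length = (i - cs).toNat :=
      pv_slice_len S cs i (by omega) hcsi (by omega)
    rw [l1, l2, hieq]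
    by_cases hc : en - st < (S.length : Int) - cs
    · rw [if_pos hc, if_pos (by omega)]
    · rw [if_neg hc, if_neg (by omega)]
  | cons y t' ih =>
    intro i st en cs g hdrop h0i hiL h0st hsten hencs hcsi
    have hilt : i.toNat < S.length := by
      have := congrArg List.length hdrop
      simp only [List.length_drop, List.length_cons] at this
      omega
    have hdrop' : S.drop (i + 1).toNat = t' := by
      have he : (i + 1).toNat = i.toNat + 1 := by omega
      rw [he, ← List.drop_drop, hdrop]; rfl
    rw [PySem.List.enumerate_cons, List.foldl_cons]
    by_cases hg : ((Int.gcd g y : Nat) : Int) > 1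
    · -- coherent step: the run continues
      have hA : pvStepA (st, en, cs, g) (i, y)
          = (st, en, cs, ((Int.gcd g y : Nat) : Int)) := by
        simp [pvStepA, hg]
      have hT : pvTakeRun g (y :: t') = y :: pvTakeRun ((Int.gcd g y : Nat) : Int) t' := by
        simp only [pvTakeRun]
        rw [if_neg (by omega)]
      rw [hA, hT,
        ih (i + 1) st en cs ((Int.gcd g y : Nat) : Int) hdrop' (by omega)
          (by omega) h0st hsten hencs (by omega),
        pv_slice_snoc S cs i y t' (by omega) hcsi hdrop]
      simp [List.append_assoc, List.drop_succ_cons]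
    · -- break: the current run ends at i, a fresh run starts at i
      have hT : pvTakeRun g (y :: t') = [] := by
        simp only [pvTakeRun]
        rw [if_pos (by omega)]
      rw [hT]
      simp only [List.append_nil, List.length_nil, List.drop_zero]
      rw [pvPeel_cons y t']
      have hsl1 : PySem.List.slice S (some i) (some (i + 1)) = [y] := by
        rw [pv_slice_snoc S i i y t' (by omega) le_rfl hdrop,
          pv_slice_nil S i (by omega)]
        rfl
      have l1 : (PySem.List.slice S (some st) (some en)).length = (en - st).toNat :=
        pv_slice_len S st en h0st hsten (by omega)
      have l2 : (PySem.List.slice S (some cs) (some i)).length = (i - cs).toNat :=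
        pv_slice_len S cs i (by omega) hcsi (by omega)
      have hrest : (y :: t').drop (y :: pvTakeRun y t').length
          = t'.drop (pvTakeRun y t').length := by
        simp [List.drop_succ_cons]
      by_cases hc : en - st ≥ i - cs
      · have hA : pvStepA (st, en, cs, g) (i, y) = (st, en, i, y) := by
          simp only [pvStepA]
          rw [if_neg (by omega), if_pos (by omega)]
        rw [hA,
          ih (i + 1) st en i y hdrop' (by omega) (by omega) h0st hsten (by omega) (by omega),
          hsl1, hrest, List.foldl_cons, List.foldl_cons]
        have : pvBest (PySem.List.slice S (some st) (some en))
            (PySem.List.slice S (some cs) (some i))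
            = PySem.List.slice S (some st) (some en) := by
          unfold pvBest
          rw [l1, l2, if_neg (by omega)]
        rw [this, List.singleton_append, List.foldl_cons]
      · have hA : pvStepA (st, en, cs, g) (i, y) = (cs, i, i, y) := by
          simp only [pvStepA]
          rw [if_neg (by omega), if_neg (by omega)]
        rw [hA,
          ih (i + 1) cs i i y hdrop' (by omega) (by omega) (by omega) hcsi le_rfl
            (by omega),
          hsl1, hrest, List.foldl_cons, List.foldl_cons]
        have : pvBest (PySem.List.slice S (some st) (some en))
            (PySem.List.slice S (some cs) (some i))
            = PySem.List.slice S (some cs) (some i) := by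
          unfold pvBest
          rw [l1, l2, if_pos (by omega)]
        rw [this, List.singleton_append, List.foldl_cons]

-- head-of-list access in A: the first element of a cons cell
lemma pv_pyGet_cons (x : Int) (xs : List Int) :
    PySem.List.pyGet? (x :: xs) 0 = some x := by
  simp [PySem.List.pyGet?, PySem.List.pyIdx?]

-- start-of-loop bridge: running A's loop from index 1 with any first gcd of the
-- same absolute value as sequence[0] yields B's result
lemma pv_main (x : Int) (xs : List Int) : ∀ g1 : Int, g1.natAbs = x.natAbs →
    pvFinish (x :: xs) ((PySem.List.enumerate xs 1).foldl pvStepA (0, 0, 0, g1))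
    = longest_coherent_non_coprime_sequence_alt (x :: xs) := by
  intro g1 hg1
  rw [pv_key (x :: xs) xs 1 0 0 0 g1 (by simp) (by omega)
    (by simp only [List.length_cons]; omega) le_rfl le_rfl le_rfl (by omega)]
  rw [pv_slice_nil _ 0 le_rfl]
  have hsl : PySem.List.slice (x :: xs) (some 0) (some 1) = [x] := by
    have h := pv_slice_snoc (x :: xs) 0 0 x xs le_rfl le_rfl (by simp)
    rw [pv_slice_nil _ 0 le_rfl] at h
    simpa using h
  rw [hsl, pvTakeRun_congr xs g1 x hg1, List.singleton_append]
  unfold longest_coherent_non_coprime_sequence_alt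
  rw [pvPeel_cons x xs, pv_maxD_cons, List.foldl_cons]
  have hb : pvBest [] (x :: pvTakeRun x xs) = x :: pvTakeRun x xs := by
    unfold pvBest
    rw [if_pos (by simp)]
  rw [hb]
  simp [List.drop_succ_cons]

-- ===== VERDICT (by name: the statements are the Claim_ definitions above) =====
theorem longest_coherent_non_coprime_sequence_spec : Claim_equal_longest_coherent_non_coprime_sequence := by
  intro sequence _ hpre
  unfold Spec_longest_coherent_non_coprime_sequence
  cases sequence with
  | nil => exact absurd rfl hpre
  | cons x xs =>
    unfold longest_coherent_non_coprime_sequence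
    rw [pv_pyGet_cons]
    by_cases hlen : ((x :: xs).length : Int) < 2
    · have hxs : xs = [] := by
        have : xs.length = 0 := by
          simp only [List.length_cons] at hlen
          omega
        exact List.eq_nil_of_length_eq_zero this
      subst hxs
      simp only [if_pos hlen]
      unfold longest_coherent_non_coprime_sequence_alt
      simp [pvPeelGo, pvTakeRun, PySem.List.maxD, PySem.List.max?]
    · simp only [if_neg hlen]
      show pvFinish (x :: xs)
        ((PySem.List.enumerate (x :: xs) 0).foldl pvStepA (0, 0, 0, x)) = _
      rw [PySem.List.enumerate_cons, List.foldl_cons]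
      have hg : Int.gcd x x = x.natAbs := Int.gcd_self
      by_cases hx : ((x.natAbs : Nat) : Int) > 1
      · have h1 : pvStepA (0, 0, 0, x) (0, x) = (0, 0, 0, ((x.natAbs : Nat) : Int)) := by
          simp only [pvStepA, hg]
          rw [if_pos (by exact_mod_cast hx)]
        rw [h1]
        exact pv_main x xs ((x.natAbs : Nat) : Int) (Int.natAbs_natCast _)
      · have h1 : pvStepA (0, 0, 0, x) (0, x) = (0, 0, 0, x) := by
          simp only [pvStepA, hg]
          rw [if_neg (by exact_mod_cast hx), if_pos (by omega)]
        rw [h1]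
        exact pv_main x xs x rfl
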